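-- pv_equiv track=rewrite | github.com/ANSH-RIYAL/Auto-Graph | src/llm_integration/semantic_analyzer.py | _determine_file_purpose
-- ===== SOURCE A (Python) =====
-- from typing import Dict, List, Optional, Any
--
-- def _determine_file_purpose(file_name: str, functions: List[str],
--                            classes: List[str], imports: List[str]) -> str:
--     """Determine the primary purpose of a file."""
--
--     # API/Controller files
--     if any(keyword in file_name for keyword in ['api', 'route', 'endpoint', 'controller']):
--         return "Handles HTTP requests and API endpoints"
--
--     # Service files
--     if any(keyword in file_name for keyword in ['service', 'business', 'logic']):
--         return "Contains business logic and service operations"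
--
--     # Model files
--     if any(keyword in file_name for keyword in ['model', 'entity', 'schema', 'dto']):
--         return "Defines data models and entities"
--
--     # Utility files
--     if any(keyword in file_name for keyword in ['util', 'helper', 'tool', 'formatter']):
--         return "Provides utility functions and helpers"
--
--     # Configuration files
--     if any(keyword in file_name for keyword in ['config', 'settings', 'conf']):
--         return "Contains configuration and settings"
--
--     # Test files
--     if any(keyword in file_name for keyword in ['test', 'spec']):
--         return "Contains test cases and specifications"
--
--     # Main application files
--     if file_name in ['app.py', 'main.py', '__init__.py']:
--         return "Main application entry point or module initialization"
--
--     # Default based on content analysis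
--     if classes:
--         return f"Defines {len(classes)} class(es) for data modeling and business logic"
--     elif functions:
--         return f"Provides {len(functions)} function(s) for various operations"
--     else:
--         return "General purpose file with mixed functionality"
-- ===== SOURCE B (Python) =====
-- def _determine_file_purpose(file_name, functions, classes, imports):
--     # Flat keyword -> group-priority map; one pass computes the minimum-priority
--     # matching group, which equals the first group of the original ordered chain.
--     KEYWORD_GROUP = {
--         'api': 0, 'route': 0, 'endpoint': 0, 'controller': 0,
--         'service': 1, 'business': 1, 'logic': 1,
--         'model': 2, 'entity': 2, 'schema': 2, 'dto': 2,
--         'util': 3, 'helper': 3, 'tool': 3, 'formatter': 3,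
--         'config': 4, 'settings': 4, 'conf': 4,
--         'test': 5, 'spec': 5,
--     }
--     MESSAGES = [
--         "Handles HTTP requests and API endpoints",
--         "Contains business logic and service operations",
--         "Defines data models and entities",
--         "Provides utility functions and helpers",
--         "Contains configuration and settings",
--         "Contains test cases and specifications",
--     ]
--     best = None
--     for kw, group in KEYWORD_GROUP.items():
--         if kw in file_name:
--             best = group if best is None else min(best, group)
--     if best is not None:
--         return MESSAGES[best]
--     if file_name in ('app.py', 'main.py', '__init__.py'):
--         return "Main application entry point or module initialization"
--     if classes:
--         return f"Defines {len(classes)} class(es) for data modeling and business logic"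
--     if functions:
--         return f"Provides {len(functions)} function(s) for various operations"
--     return "General purpose file with mixed functionality"
-- ===== Notes on version B (the rewrite author's own statement) =====
-- stated objective: alternative
-- what changed: Replaces the ordered early-return keyword if-chain by a single pass over a flat keyword->priority map that computes the minimum priority among all matching keywords and indexes a message table with it; only the entry-point/content fallback stays a chain.
import Mathlib
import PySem

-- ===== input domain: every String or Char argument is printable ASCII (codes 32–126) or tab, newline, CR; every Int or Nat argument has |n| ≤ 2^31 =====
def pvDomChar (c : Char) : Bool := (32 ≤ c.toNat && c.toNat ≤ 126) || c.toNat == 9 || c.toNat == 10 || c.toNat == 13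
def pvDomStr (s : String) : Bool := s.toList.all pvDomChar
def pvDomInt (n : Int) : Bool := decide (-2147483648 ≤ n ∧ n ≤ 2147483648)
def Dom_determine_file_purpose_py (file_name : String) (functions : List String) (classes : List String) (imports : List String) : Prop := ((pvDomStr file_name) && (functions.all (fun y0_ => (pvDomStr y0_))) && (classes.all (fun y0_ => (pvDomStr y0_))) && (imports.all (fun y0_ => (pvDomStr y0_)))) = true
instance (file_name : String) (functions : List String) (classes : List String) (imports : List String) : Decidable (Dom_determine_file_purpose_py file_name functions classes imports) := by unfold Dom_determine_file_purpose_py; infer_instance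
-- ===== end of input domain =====

-- B replaces the ordered keyword if-chain by one pass over a flat keyword->priority map taking the minimum matching priority; same behaviour (alternative decomposition).


-- ===== PORT A =====
def determine_file_purpose_py (file_name : String) (functions : List String) (classes : List String) (imports : List String) : String :=
  if (["api", "route", "endpoint", "controller"].any (fun keyword => PySem.Str.isIn keyword file_name)) then "Handles HTTP requests and API endpoints"
  else if (["service", "business", "logic"].any (fun keyword => PySem.Str.isIn keyword file_name)) then "Contains business logic and service operations"
  else if (["model", "entity", "schema", "dto"].any (fun keyword => PySem.Str.isIn keyword file_name)) then "Defines data models and entities"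
  else if (["util", "helper", "tool", "formatter"].any (fun keyword => PySem.Str.isIn keyword file_name)) then "Provides utility functions and helpers"
  else if (["config", "settings", "conf"].any (fun keyword => PySem.Str.isIn keyword file_name)) then "Contains configuration and settings"
  else if (["test", "spec"].any (fun keyword => PySem.Str.isIn keyword file_name)) then "Contains test cases and specifications"
  else if (file_name == "app.py" || file_name == "main.py" || file_name == "__init__.py") then "Main application entry point or module initialization"
  else if (classes ≠ []) then "Defines " ++ PySem.Int.toStr (classes.length : Int) ++ " class(es) for data modeling and business logic"
  else if (functions ≠ []) then "Provides " ++ PySem.Int.toStr (functions.length : Int) ++ " function(s) for various operations"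
  else "General purpose file with mixed functionality"

-- ===== PORT B =====
-- the flat keyword -> group-priority dict (insertion order), as an association list
def pvKeywordGroup : List (String × Nat) :=
  [("api", 0), ("route", 0), ("endpoint", 0), ("controller", 0),
   ("service", 1), ("business", 1), ("logic", 1),
   ("model", 2), ("entity", 2), ("schema", 2), ("dto", 2),
   ("util", 3), ("helper", 3), ("tool", 3), ("formatter", 3),
   ("config", 4), ("settings", 4), ("conf", 4),
   ("test", 5), ("spec", 5)]

def pvMessages : List String :=
  ["Handles HTTP requests and API endpoints",
   "Contains business logic and service operations",
   "Defines data models and entities",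
   "Provides utility functions and helpers",
   "Contains configuration and settings",
   "Contains test cases and specifications"]

-- loop body: best = group if best is None else min(best, group) when kw in file_name
def pvStep (file_name : String) (best : Option Nat) (kp : String × Nat) : Option Nat :=
  if PySem.Str.isIn kp.1 file_name then
    some (match best with | none => kp.2 | some q => min q kp.2)
  else best

def determine_file_purpose_py_alt (file_name : String) (functions : List String) (classes : List String) (imports : List String) : String :=
  match pvKeywordGroup.foldl (pvStep file_name) none with
  | some best => pvMessages.getD best ""   -- MESSAGES[best]; best is always in range 0..5
  | none =>
    if (file_name == "app.py" || file_name == "main.py" || file_name == "__init__.py") then "Main application entry point or module initialization"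
    else if (classes ≠ []) then "Defines " ++ PySem.Int.toStr (classes.length : Int) ++ " class(es) for data modeling and business logic"
    else if (functions ≠ []) then "Provides " ++ PySem.Int.toStr (functions.length : Int) ++ " function(s) for various operations"
    else "General purpose file with mixed functionality"

-- ===== PRECONDITION & SPEC =====
def Spec_determine_file_purpose_py (file_name : String) (functions : List String) (classes : List String) (imports : List String) (out : String) : Prop := out = determine_file_purpose_py_alt file_name functions classes imports
instance (file_name : String) (functions : List String) (classes : List String) (imports : List String) (out : String) : Decidable (Spec_determine_file_purpose_py file_name functions classes imports out) := by unfold Spec_determine_file_purpose_py; infer_instance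

-- ===== CLAIM (what is proved, stated in full; the proofs are below) =====
def Claim_equal_determine_file_purpose_py : Prop := ∀ (file_name : String) (functions : List String) (classes : List String) (imports : List String), Dom_determine_file_purpose_py file_name functions classes imports → Spec_determine_file_purpose_py file_name functions classes imports (determine_file_purpose_py file_name functions classes imports)

-- ===== LEMMAS AND PROOFS =====

-- best after absorbing one matched keyword of priority p
def pvMinWith : Option Nat → Nat → Nat
  | none, p => p
  | some q, p => min q p

theorem pvStep_eq (fn : String) (best : Option Nat) (k : String) (p : Nat) :
    pvStep fn best (k, p) = if PySem.Str.isIn k fn then some (pvMinWith best p) else best := by cases best <;> rfl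

theorem pvMinWith_idem (best : Option Nat) (p : Nat) :
    pvMinWith (some (pvMinWith best p)) p = pvMinWith best p := by
  cases best <;> simp [pvMinWith]

-- the flat dict is the concatenation of the six same-priority groups
theorem pvKeywordGroup_split :
    pvKeywordGroup =
      (["api", "route", "endpoint", "controller"].map (fun k => (k, 0))) ++
      (["service", "business", "logic"].map (fun k => (k, 1))) ++
      (["model", "entity", "schema", "dto"].map (fun k => (k, 2))) ++
      (["util", "helper", "tool", "formatter"].map (fun k => (k, 3))) ++
      (["config", "settings", "conf"].map (fun k => (k, 4))) ++
      (["test", "spec"].map (fun k => (k, 5))) := rfl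

-- folding a whole same-priority group: matched iff any keyword is in file_name
theorem pvGroup_fold (fn : String) (p : Nat) (ks : List String) (best : Option Nat) :
    List.foldl (pvStep fn) best (ks.map (fun k => (k, p))) =
    if ks.any (fun keyword => PySem.Str.isIn keyword fn) then some (pvMinWith best p) else best := by
  induction ks generalizing best with
  | nil => rfl
  | cons k ks ih =>
    rw [List.map_cons, List.foldl_cons, ih, pvStep_eq, List.any_cons]
    cases h : PySem.Str.isIn k fn
    · simp only [Bool.false_or, Bool.false_eq_true, if_false]
    · simp only [Bool.true_or, if_true, pvMinWith_idem, ite_self]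

-- ===== VERDICT (by name: the statement is the Claim_ definition above) =====
theorem determine_file_purpose_py_spec : Claim_equal_determine_file_purpose_py := by
  intro file_name functions classes imports _
  unfold Spec_determine_file_purpose_py determine_file_purpose_py determine_file_purpose_py_alt
  rw [pvKeywordGroup_split]
  simp only [List.foldl_append, pvGroup_fold]
  cases h0 : (["api", "route", "endpoint", "controller"].any (fun keyword => PySem.Str.isIn keyword file_name)) <;>
  cases h1 : (["service", "business", "logic"].any (fun keyword => PySem.Str.isIn keyword file_name)) <;>
  cases h2 : (["model", "entity", "schema", "dto"].any (fun keyword => PySem.Str.isIn keyword file_name)) <;>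
  cases h3 : (["util", "helper", "tool", "formatter"].any (fun keyword => PySem.Str.isIn keyword file_name)) <;>
  cases h4 : (["config", "settings", "conf"].any (fun keyword => PySem.Str.isIn keyword file_name)) <;>
  cases h5 : (["test", "spec"].any (fun keyword => PySem.Str.isIn keyword file_name)) <;>
    rfl
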